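-- pv_equiv track=rewrite | github.com/Atsocs/codeforces | Codeforces Round #693 (Div. 3)/Problems/B. Fair Division/main.py | solve
-- ===== SOURCE A (Python) =====
-- def solve(a):
--     ones, twos = map(a.count, [1, 2])
--     s = ones + 2 * twos
--     is_odd = s % 2 == 1
--     if is_odd:
--         return False
--     target = s // 2
--     for i in range(ones + 1):
--         for j in range(twos + 1):
--             if i + 2 * j == target:
--                 return True
--     return False
-- ===== SOURCE B (Python) =====
-- def solve(a):
--     ones = a.count(1)
--     twos = a.count(2)
--     s = ones + 2 * twos
--     if s % 2 == 1:
--         return False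
--     half = s // 2
--     return half % 2 == 0 or ones > 0
-- ===== Notes on version B (the rewrite author's own statement) =====
-- stated objective: simpler
-- what changed: Replaces A's nested search over all (i,j) pairs with a direct arithmetic parity test: the even total's half is reachable iff it is even itself or a 1 is available for the odd remainder.
import Mathlib
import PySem

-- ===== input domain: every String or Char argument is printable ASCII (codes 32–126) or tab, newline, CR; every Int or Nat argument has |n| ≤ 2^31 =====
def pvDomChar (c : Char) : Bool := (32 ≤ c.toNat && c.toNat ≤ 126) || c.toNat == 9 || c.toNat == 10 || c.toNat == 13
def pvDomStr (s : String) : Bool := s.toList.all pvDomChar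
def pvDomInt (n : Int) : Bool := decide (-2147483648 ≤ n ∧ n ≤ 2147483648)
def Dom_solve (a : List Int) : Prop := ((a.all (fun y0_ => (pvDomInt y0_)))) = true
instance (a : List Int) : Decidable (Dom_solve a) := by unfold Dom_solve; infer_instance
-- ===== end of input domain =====

-- B replaces A's nested search over all (i,j) pairs by a direct arithmetic parity test after counting (simpler).

-- ===== PORT A =====
def solve (a : List Int) : Bool :=
  let ones : Int := PySem.List.count a 1
  let twos : Int := PySem.List.count a 2
  let s : Int := ones + 2 * twos
  let isOdd : Bool := PySem.Int.mod s 2 == 1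
  if isOdd then false
  else
    let target := PySem.Int.floordiv s 2
    (PySem.List.pyRange 0 (ones + 1) 1).any (fun i =>
      (PySem.List.pyRange 0 (twos + 1) 1).any (fun j => i + 2 * j == target))

-- ===== PORT B =====
def solve_alt (a : List Int) : Bool :=
  let ones : Int := PySem.List.count a 1
  let twos : Int := PySem.List.count a 2
  let s : Int := ones + 2 * twos
  if PySem.Int.mod s 2 == 1 then false
  else
    let half := PySem.Int.floordiv s 2
    PySem.Int.mod half 2 == 0 || decide (ones > 0)

-- ===== PRECONDITION & SPEC =====
def Spec_solve (a : List Int) (out : Bool) : Prop := out = solve_alt a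
instance (a : List Int) (out : Bool) : Decidable (Spec_solve a out) := by unfold Spec_solve; infer_instance

-- ===== CLAIM (what is proved, stated in full; the proofs are below) =====
def Claim_equal_solve : Prop := ∀ (a : List Int), Dom_solve a → Spec_solve a (solve a)

-- ===== LEMMAS AND PROOFS =====

-- When s = ones + 2*twos is even, A's exhaustive search over 0 ≤ i ≤ ones, 0 ≤ j ≤ twos
-- succeeds exactly when the half-sum is even or a 1 is available.
theorem solve_key (ones twos : Nat)
    (h : PySem.Int.mod ((ones : Int) + 2 * twos) 2 = 0) :
    ((PySem.List.pyRange 0 ((ones : Int) + 1) 1).any (fun i =>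
      (PySem.List.pyRange 0 ((twos : Int) + 1) 1).any (fun j =>
        i + 2 * j == PySem.Int.floordiv ((ones : Int) + 2 * twos) 2)))
    = (PySem.Int.mod (PySem.Int.floordiv ((ones : Int) + 2 * twos) 2) 2 == 0
        || decide ((ones : Int) > 0)) := by
  rw [PySem.Int.floordiv_eq_ediv_of_pos (by norm_num),
      PySem.Int.mod_eq_emod_of_pos (by norm_num)] at *
  set t : Int := ((ones : Int) + 2 * twos) / 2 with ht
  have hdm := Int.mul_ediv_add_emod ((ones : Int) + 2 * twos) 2
  rw [Bool.eq_iff_iff]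
  simp only [List.any_eq_true, PySem.List.mem_pyRange_one, beq_iff_eq,
    Bool.or_eq_true, decide_eq_true_iff]
  constructor
  · rintro ⟨i, ⟨hi0, hi1⟩, j, ⟨hj0, hj1⟩, hij⟩
    omega
  · intro hor
    by_cases hc : t / 2 ≤ (twos : Int)
    · exact ⟨t - 2 * (t / 2), by omega, t / 2, by omega, by omega⟩
    · exact ⟨t - 2 * twos, by omega, (twos : Int), by omega, by omega⟩

-- ===== VERDICT (by name: the statement is the Claim_ definition above) =====
theorem solve_spec : Claim_equal_solve := by
  intro a _
  unfold Spec_solve solve solve_alt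
  simp only []
  rcases PySem.Int.mod_two_eq ((PySem.List.count a 1 : Int) + 2 * (PySem.List.count a 2 : Int)) with h | h
  · rw [h]
    simp only [show ((0 : Int) == 1) = false by decide]
    exact solve_key _ _ h
  · rw [h]
    simp
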